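-- pv_equiv track=rewrite | github.com/deeps-blip/FTI | intelligence/report_builder.py | _collapse_intents
-- ===== SOURCE A (Python) =====
-- def _collapse_intents(intents):
--     summary = {}
--
--     for item in intents:
--         for purpose in item.get("purposes", []):
--             summary[purpose] = summary.get(purpose, 0) + 1
--
--     return {
--         "observed_function_purposes": list(summary.keys()),
--         "dominant_behaviors": [
--             k for k, v in summary.items() if v >= 2
--         ]
--     }
-- ===== SOURCE B (Python) =====
-- def _collapse_intents(intents):
--     flat = []
--     for item in intents:
--         flat.extend(item.get("purposes", []))
--     observed = [p for i, p in enumerate(flat) if p not in flat[:i]]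
--     dominant = [p for p in observed if p in flat[flat.index(p) + 1:]]
--     return {
--         "observed_function_purposes": observed,
--         "dominant_behaviors": dominant,
--     }
-- ===== Notes on version B (the rewrite author's own statement) =====
-- stated objective: alternative
-- what changed: Replaces the single-pass counting dictionary with staged passes over a flattened purpose list: first-occurrence dedup via a prefix-membership test, and dominance decided by whether a purpose reappears in the slice after its first index - no counts or dicts at all.
import Mathlib
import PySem

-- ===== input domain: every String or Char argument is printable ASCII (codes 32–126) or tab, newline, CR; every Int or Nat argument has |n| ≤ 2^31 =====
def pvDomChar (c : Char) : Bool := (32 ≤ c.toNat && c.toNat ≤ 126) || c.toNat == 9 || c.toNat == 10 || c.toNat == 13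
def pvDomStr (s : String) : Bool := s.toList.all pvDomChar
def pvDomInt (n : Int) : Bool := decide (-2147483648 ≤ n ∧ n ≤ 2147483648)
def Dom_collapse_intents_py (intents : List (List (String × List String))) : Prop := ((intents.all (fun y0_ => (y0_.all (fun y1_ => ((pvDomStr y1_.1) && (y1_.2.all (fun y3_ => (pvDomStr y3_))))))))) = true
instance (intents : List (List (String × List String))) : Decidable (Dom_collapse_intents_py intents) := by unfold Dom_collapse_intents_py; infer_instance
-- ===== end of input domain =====

-- B replaces A's single-pass counting dictionary with staged passes over a flattened purpose
-- list: first-occurrence dedup by a prefix-membership test, dominance by whether a purpose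
-- reappears in the slice after its first index — no dicts or counts (alternative decomposition).

-- ===== PORT A =====
def collapse_intents_py (intents : List (List (String × List String))) : List (String × List String) :=
  let summary : PySem.Dict String Int :=
    intents.foldl
      (fun s item =>
        (PySem.Dict.getD (PySem.Dict.mk item) "purposes" []).foldl
          (fun s purpose => s.insert purpose (s.getD purpose 0 + 1)) s)
      PySem.Dict.empty
  [("observed_function_purposes", summary.keys),
   ("dominant_behaviors", (summary.items.filter (fun kv => 2 ≤ kv.2)).map (fun kv => kv.1))]

-- ===== PORT B =====
def collapse_intents_py_alt (intents : List (List (String × List String))) : List (String × List String) :=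
  let flat :=
    intents.foldl (fun acc item => acc ++ PySem.Dict.getD (PySem.Dict.mk item) "purposes" []) []
  let observed :=
    ((PySem.List.enumerate flat).filter
      (fun ip => !((PySem.List.slice flat none (some ip.1)).contains ip.2))).map (fun ip => ip.2)
  -- flat.index(p): every p in observed is in flat, so index? is always some and the getD 0
  -- default never fires (exact port of Python's flat.index(p) here)
  let dominant :=
    observed.filter
      (fun p =>
        (PySem.List.slice flat (some (((PySem.List.index? flat p).getD 0 : Int) + 1)) none).contains p)
  [("observed_function_purposes", observed), ("dominant_behaviors", dominant)]

-- ===== PRECONDITION & SPEC =====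
def Spec_collapse_intents_py (intents : List (List (String × List String))) (out : List (String × List String)) : Prop := out = collapse_intents_py_alt intents
instance (intents : List (List (String × List String))) (out : List (String × List String)) : Decidable (Spec_collapse_intents_py intents out) := by unfold Spec_collapse_intents_py; infer_instance

-- ===== CLAIM (what is proved, stated in full; the proofs are below) =====
def Claim_equal_collapse_intents_py : Prop := ∀ (intents : List (List (String × List String))), Dom_collapse_intents_py intents → Spec_collapse_intents_py intents (collapse_intents_py intents)

-- ===== LEMMAS AND PROOFS =====

-- A's nested loop over items is a single fold over the flattened purposes
theorem pv_foldl_foldl_flatMap {α β γ : Type} (f : α → List β) (g : γ → β → γ) :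
    ∀ (l : List α) (init : γ),
      l.foldl (fun s a => (f a).foldl g s) init = (l.flatMap f).foldl g init := by
  intro l
  induction l with
  | nil => intro init; simp
  | cons a t ih => intro init; simp [List.foldl_append, ih]

-- B's extend-loop is the same flattening
theorem pv_foldl_append_flatMap {α β : Type} (f : α → List β) :
    ∀ (l : List α) (init : List β),
      l.foldl (fun acc a => acc ++ f a) init = init ++ l.flatMap f := by
  intro l
  induction l with
  | nil => intro init; simp
  | cons a t ih => intro init; simp [ih]

-- the first-occurrence comprehension computes the ordered dedup (PySem.Set.ofList)
theorem pv_observed_eq (l : List String) :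
    ((PySem.List.enumerate l).filter
        (fun ip => !((PySem.List.slice l none (some ip.1)).contains ip.2))).map (fun ip => ip.2)
      = PySem.Set.ofList l := by
  induction l using List.reverseRecOn with
  | nil => simp [PySem.List.enumerate, PySem.Set.ofList]
  | append_singleton t p ih =>
    rw [PySem.List.enumerate_append]
    have hlast : PySem.List.enumerate [p] (0 + (t.length : Int)) = [((t.length : Int), p)] := by
      simp [PySem.List.enumerate]
    rw [hlast, List.filter_append, List.map_append]
    have hpref :
        (PySem.List.enumerate t 0).filter
            (fun ip => !((PySem.List.slice (t ++ [p]) none (some ip.1)).contains ip.2))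
          = (PySem.List.enumerate t 0).filter
            (fun ip => !((PySem.List.slice t none (some ip.1)).contains ip.2)) := by
      apply List.filter_congr
      intro ip hip
      obtain ⟨k, hk, hip⟩ := (PySem.List.mem_enumerate_iff _ _ _).mp hip
      subst hip
      simp only [zero_add, PySem.List.slice_to_natCast]
      rw [List.take_append_of_le_length (le_of_lt hk)]
    rw [hpref, ih, PySem.Set.ofList_append_singleton]
    have htake : PySem.List.slice (t ++ [p]) none (some ((t.length : Int))) = t := by
      rw [PySem.List.slice_to_natCast, List.take_left]
    by_cases hp : p ∈ t
    · have : List.filter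
          (fun ip => !((PySem.List.slice (t ++ [p]) none (some ip.1)).contains ip.2))
          [((t.length : Int), p)] = [] := by
        simp [htake, hp]
      rw [this, List.map_nil, List.append_nil, PySem.Set.add_of_mem ((PySem.Set.mem_ofList _ _).mpr hp)]
    · have : List.filter
          (fun ip => !((PySem.List.slice (t ++ [p]) none (some ip.1)).contains ip.2))
          [((t.length : Int), p)] = [((t.length : Int), p)] := by
        simp [htake, hp]
      rw [this, List.map_cons, List.map_nil,
        PySem.Set.add_of_not_mem (fun hmem => hp ((PySem.Set.mem_ofList _ _).mp hmem))]

-- reappearing after the first index is the same as occurring at least twice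
theorem pv_after_first_iff_count (l : List String) (a : String) (ha : a ∈ l) :
    (PySem.List.slice l (some (((PySem.List.index? l a).getD 0 : Int) + 1)) none).contains a
      = decide (2 ≤ (l.count a : Int)) := by
  obtain ⟨k, hk⟩ := Option.isSome_iff_exists.mp ((PySem.List.index?_isSome_iff _ _).mpr ha)
  obtain ⟨pre, suf, hl, hlen, hpre⟩ := (PySem.List.index?_eq_some_iff _ _ _).mp hk
  rw [hk]
  have hcast : ((some k).getD 0 : Int) + 1 = ((k + 1 : Nat) : Int) := by
    simp
  rw [hcast, PySem.List.slice_from_natCast]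
  subst hl
  have hdrop : (pre ++ a :: suf).drop (k + 1) = suf := by
    have : pre ++ a :: suf = (pre ++ [a]) ++ suf := by simp
    rw [this, ← hlen]
    have : (pre ++ [a]).length = pre.length + 1 := by simp
    rw [← this, List.drop_left]
  rw [hdrop]
  have hcount : (pre ++ a :: suf).count a = 1 + suf.count a := by
    rw [List.count_append, List.count_cons_self, List.count_eq_zero.mpr hpre]
    omega
  rw [hcount]
  by_cases hs : a ∈ suf
  · have h1 : 1 ≤ suf.count a := List.count_pos_iff.mpr hs
    have h2 : (2 : Int) ≤ 1 + (suf.count a : Int) := by exact_mod_cast (by omega : 2 ≤ 1 + suf.count a)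
    simp [hs, h2]
  · have h0 : suf.count a = 0 := List.count_eq_zero.mpr hs
    simp [hs, h0]

-- ===== VERDICT (by name: the statement is the Claim_ definition above) =====
theorem collapse_intents_py_spec : Claim_equal_collapse_intents_py := by
  intro intents _
  unfold Spec_collapse_intents_py collapse_intents_py collapse_intents_py_alt
  simp only [pv_foldl_foldl_flatMap, pv_foldl_append_flatMap, List.nil_append]
  set flat := intents.flatMap (fun item => PySem.Dict.getD (PySem.Dict.mk item) "purposes" []) with hflat
  rw [PySem.Dict.foldl_insert_getD_add_one_eq_counter, PySem.Dict.keys_counter,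
    PySem.Dict.items_counter, List.filter_map, List.map_map, pv_observed_eq]
  have hmap : ((fun kv : String × Int => kv.1) ∘ fun k : String => (k, (flat.count k : Int))) =
      fun (k : String) => k := rfl
  rw [hmap, List.map_id' _]
  congr 1
  congr 1
  congr 1
  apply List.filter_congr
  intro a hamem
  have ha : a ∈ flat := (PySem.Set.mem_ofList _ _).mp hamem
  rw [pv_after_first_iff_count flat a ha]
  rfl
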